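-- pv_equiv track=rewrite | github.com/Agus76677/project-kyber | test/gen_cbd_vectors.py | cbd_coefficients
-- ===== SOURCE A (Python) =====
-- from typing import List
--
-- def cbd_coefficients(bitstream: List[int], eta: int, count: int) -> List[int]:
--     coeffs: List[int] = []
--     idx = 0
--     needed_bits = 2 * eta
--     total_bits = len(bitstream)
--     while len(coeffs) < count:
--         if idx + needed_bits > total_bits:
--             raise ValueError("not enough bits in stream")
--         sum_a = sum(bitstream[idx + i] for i in range(eta))
--         sum_b = sum(bitstream[idx + eta + i] for i in range(eta))
--         coeffs.append(sum_a - sum_b)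
--         idx += needed_bits
--     return coeffs
-- ===== SOURCE B (Python) =====
-- from typing import List
--
-- def cbd_coefficients(bitstream: List[int], eta: int, count: int) -> List[int]:
--     if count <= 0:
--         return []
--     if eta <= 0:
--         return [0] * count
--     prefix = [0]
--     for b in bitstream:
--         prefix.append(prefix[-1] + b)
--     out: List[int] = []
--     for j in range(count):
--         base = 2 * eta * j
--         if base + 2 * eta > len(bitstream):
--             raise ValueError("not enough bits in stream")
--         out.append(2 * prefix[base + eta] - prefix[base] - prefix[base + 2 * eta])
--     return out
-- ===== Notes on version B (the rewrite author's own statement) =====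
-- stated objective: faster
-- what changed: Replaces A's per-coefficient re-summing of 2*eta individual bits by a cumulative prefix-sum table built once, so each coefficient is three table lookups; eta<=0 / count<=0 handled by closed-form early returns.
import Mathlib
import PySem

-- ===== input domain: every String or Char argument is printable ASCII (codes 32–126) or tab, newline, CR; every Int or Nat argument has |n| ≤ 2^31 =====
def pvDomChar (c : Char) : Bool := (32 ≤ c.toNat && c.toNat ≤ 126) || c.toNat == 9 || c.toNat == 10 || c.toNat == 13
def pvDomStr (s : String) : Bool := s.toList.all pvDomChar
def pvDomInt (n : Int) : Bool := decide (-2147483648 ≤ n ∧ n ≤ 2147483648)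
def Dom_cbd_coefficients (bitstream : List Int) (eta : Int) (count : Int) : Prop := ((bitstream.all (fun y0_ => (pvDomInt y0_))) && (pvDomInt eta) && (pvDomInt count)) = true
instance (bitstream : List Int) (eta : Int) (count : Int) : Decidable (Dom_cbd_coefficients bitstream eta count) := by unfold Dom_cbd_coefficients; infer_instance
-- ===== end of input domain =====

-- B builds a prefix-sum table once and reads each coefficient off it in O(1) (faster: O(len+count) vs A's O(count*eta)); equivalence is on the return value.

-- ===== PORT A =====
-- A's while-loop: structural recursion on the number of coefficients still to produce.
def cbdA_loop (bitstream : List Int) (eta : Int) (count : Int) (coeffs : List Int) (idx : Int) : List Int :=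
  if (coeffs.length : Int) < count then
    if idx + 2 * eta > (bitstream.length : Int) then coeffs  -- A raises ValueError here: outside Pre_
    else
      let sum_a := (PySem.List.pyRange 0 eta 1).foldl (fun s i => s + PySem.List.pyGetD bitstream (idx + i) 0) 0
      let sum_b := (PySem.List.pyRange 0 eta 1).foldl (fun s i => s + PySem.List.pyGetD bitstream (idx + eta + i) 0) 0
      cbdA_loop bitstream eta count (coeffs ++ [sum_a - sum_b]) (idx + 2 * eta)
  else coeffs
termination_by (count - coeffs.length).toNat
decreasing_by simp; omega

def cbd_coefficients (bitstream : List Int) (eta : Int) (count : Int) : List Int :=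
  cbdA_loop bitstream eta count [] 0

-- ===== PORT B =====
def cbd_coefficients_alt (bitstream : List Int) (eta : Int) (count : Int) : List Int :=
  if count ≤ 0 then []
  else if eta ≤ 0 then List.replicate count.toNat 0
  else
    let pre_ := bitstream.foldl (fun p b => p ++ [PySem.List.pyGetD p (-1) 0 + b]) [0]
    (PySem.List.pyRange 0 count 1).foldl
      (fun out j =>
        let base := 2 * eta * j
        if base + 2 * eta > (bitstream.length : Int) then out  -- B raises ValueError here: outside Pre_
        else out ++ [2 * PySem.List.pyGetD pre_ (base + eta) 0
                      - PySem.List.pyGetD pre_ base 0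
                      - PySem.List.pyGetD pre_ (base + 2 * eta) 0])
      []

-- ===== PRECONDITION & SPEC =====
-- Pre_ excludes exactly the inputs on which A raises ValueError ("not enough bits in stream"):
-- count > 0, eta > 0 and 2*eta*count > len(bitstream). B raises the same ValueError there.
def Pre_cbd_coefficients (bitstream : List Int) (eta : Int) (count : Int) : Prop :=
  count ≤ 0 ∨ eta ≤ 0 ∨ 2 * eta * count ≤ (bitstream.length : Int)
instance (bitstream : List Int) (eta : Int) (count : Int) : Decidable (Pre_cbd_coefficients bitstream eta count) := by unfold Pre_cbd_coefficients; infer_instance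

def pvWitness_cbd_coefficients : List Int × Int × Int := ([1, 0, 1, 1], 1, 2)

def Spec_cbd_coefficients (bitstream : List Int) (eta : Int) (count : Int) (out : List Int) : Prop := out = cbd_coefficients_alt bitstream eta count
instance (bitstream : List Int) (eta : Int) (count : Int) (out : List Int) : Decidable (Spec_cbd_coefficients bitstream eta count out) := by unfold Spec_cbd_coefficients; infer_instance

-- ===== CLAIM (what is proved, stated in full; the proofs are below) =====
def Claim_equal_cbd_coefficients : Prop := ∀ (bitstream : List Int) (eta : Int) (count : Int), Dom_cbd_coefficients bitstream eta count → Pre_cbd_coefficients bitstream eta count → Spec_cbd_coefficients bitstream eta count (cbd_coefficients bitstream eta count)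

-- ===== LEMMAS AND PROOFS =====

-- sum of the first m elements (m an Int clamped at 0): prefix[m] in B, partial sums in A
def takeSum (bs : List Int) (m : Int) : Int := (bs.take m.toNat).sum

-- B's prefix table, characterised as a map of take-sums
lemma prefix_aux (bs : List Int) : ∀ (p : List Int) (x : Int),
    bs.foldl (fun p b => p ++ [PySem.List.pyGetD p (-1) 0 + b]) (p ++ [x])
      = (p ++ [x]) ++ (List.range bs.length).map (fun k => x + (bs.take (k + 1)).sum) := by
  induction bs with
  | nil => intro p x; simp
  | cons b bs ih =>
    intro p x
    have h1 : PySem.List.pyGetD (p ++ [x]) (-1) 0 = x :=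
      PySem.List.pyGetD_neg_one_append_singleton p x 0
    simp only [List.foldl_cons, h1]
    rw [ih (p ++ [x]) (x + b)]
    simp only [List.length_cons, List.range_succ_eq_map, List.map_cons, List.map_map]
    simp [Function.comp, List.take_succ_cons, add_assoc]

lemma prefix_eq (bs : List Int) :
    bs.foldl (fun p b => p ++ [PySem.List.pyGetD p (-1) 0 + b]) [0]
      = (List.range (bs.length + 1)).map (fun k => (bs.take k).sum) := by
  have := prefix_aux bs [] 0
  simp at this
  rw [this]
  rw [List.range_succ_eq_map]
  simp [List.map_map, Function.comp]

lemma prefix_get (bs : List Int) (k : Int) (h0 : 0 ≤ k) (hk : k ≤ (bs.length : Int)) :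
    PySem.List.pyGetD (bs.foldl (fun p b => p ++ [PySem.List.pyGetD p (-1) 0 + b]) [0]) k 0
      = takeSum bs k := by
  rw [prefix_eq]
  have hlen : ((List.range (bs.length + 1)).map (fun k => (bs.take k).sum)).length = bs.length + 1 := by simp
  have hkl : k < (((List.range (bs.length + 1)).map (fun k => (bs.take k).sum)).length : Int) := by
    rw [hlen]; push_cast; omega
  rw [PySem.List.pyGetD_eq_getElem _ 0 h0 hkl]
  have hk' : k.toNat < bs.length + 1 := by omega
  simp [takeSum]

-- A's per-coefficient bit sum as a difference of take-sums
lemma sumA_eq (bs : List Int) (a : Int) (ha : 0 ≤ a) : ∀ (n : Nat), a + n ≤ (bs.length : Int) →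
    (PySem.List.pyRange 0 (n : Int) 1).foldl (fun s i => s + PySem.List.pyGetD bs (a + i) 0) 0
      = takeSum bs (a + n) - takeSum bs a := by
  intro n
  induction n with
  | zero => intro _; simp [PySem.List.pyRange_one_eq_nil, takeSum]
  | succ n ih =>
    intro hb
    have h1 : ((n : Int) + 1) = ((n + 1 : Nat) : Int) := by push_cast; ring
    have hr : PySem.List.pyRange 0 ((n + 1 : Nat) : Int) 1
        = PySem.List.pyRange 0 (n : Int) 1 ++ [(n : Int)] := by
      rw [← h1, PySem.List.pyRange_one_succ_right (by positivity)]
    rw [hr, List.foldl_append]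
    rw [ih (by push_cast at hb ⊢; omega)]
    simp only [List.foldl_cons, List.foldl_nil]
    have hidx0 : (0 : Int) ≤ a + n := by positivity
    have hidx1 : a + (n : Int) < (bs.length : Int) := by push_cast at hb; omega
    rw [PySem.List.pyGetD_eq_getElem bs 0 hidx0 hidx1]
    have hm : (a + (n : Int)).toNat < bs.length := by omega
    have hsucc := List.sum_take_succ bs (a + (n : Int)).toNat hm
    simp only [takeSum]
    push_cast
    rw [show (a + ((n : Int) + 1)).toNat = (a + (n : Int)).toNat + 1 from by omega, hsucc]
    ring

lemma sumA_eq' (bs : List Int) (a eta : Int) (ha : 0 ≤ a) (he : 0 ≤ eta)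
    (hb : a + eta ≤ (bs.length : Int)) :
    (PySem.List.pyRange 0 eta 1).foldl (fun s i => s + PySem.List.pyGetD bs (a + i) 0) 0
      = takeSum bs (a + eta) - takeSum bs a := by
  obtain ⟨n, rfl⟩ : ∃ n : Nat, eta = (n : Int) := ⟨eta.toNat, by omega⟩
  exact sumA_eq bs a ha n hb

-- the common closed form of one coefficient
def coeffAt (bs : List Int) (eta : Int) (base : Int) : Int :=
  (takeSum bs (base + eta) - takeSum bs base) - (takeSum bs (base + 2 * eta) - takeSum bs (base + eta))

-- A's loop, eta > 0 case
lemma loopA_pos (bs : List Int) (eta count : Int) (hη : 0 < eta) :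
    ∀ (n : Nat) (coeffs : List Int) (idx : Int), 0 ≤ idx →
      count = (coeffs.length : Int) + n → idx + 2 * eta * n ≤ (bs.length : Int) →
      cbdA_loop bs eta count coeffs idx
        = coeffs ++ (List.range n).map (fun j : Nat => coeffAt bs eta (idx + 2 * eta * (j : Int))) := by
  intro n
  induction n with
  | zero =>
    intro coeffs idx _ hc _
    rw [cbdA_loop]
    simp at hc
    simp [hc]
  | succ n ih =>
    intro coeffs idx hidx hc hbound
    rw [cbdA_loop]
    have hcond : (coeffs.length : Int) < count := by push_cast at hc; omega
    have hguard : ¬ (idx + 2 * eta > (bs.length : Int)) := by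
      push_cast at hbound; nlinarith
    rw [if_pos hcond, if_neg hguard]
    have hsa := sumA_eq' bs idx eta hidx (le_of_lt hη)
      (by push_cast at hbound ⊢; nlinarith)
    have hsb := sumA_eq' bs (idx + eta) eta (by omega) (le_of_lt hη)
      (by push_cast at hbound ⊢; nlinarith)
    rw [hsa, hsb]
    rw [ih (coeffs ++ [_]) (idx + 2 * eta) (by omega) (by simp; push_cast at hc ⊢; omega)
        (by push_cast at hbound ⊢; nlinarith)]
    rw [List.append_assoc]
    congr 1
    rw [List.range_succ_eq_map, List.map_cons, List.map_map, List.singleton_append]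
    congr 1
    · have h2 : idx + eta + eta = idx + 2 * eta := by ring
      simp [coeffAt, h2]
    · apply List.map_congr_left
      intro k _
      simp only [Function.comp]
      congr 1
      push_cast
      ring

-- A's loop, eta ≤ 0 case: every coefficient is 0 and the guard never fires
lemma loopA_nonpos (bs : List Int) (eta count : Int) (hη : eta ≤ 0) :
    ∀ (n : Nat) (coeffs : List Int) (idx : Int), idx ≤ 0 →
      count = (coeffs.length : Int) + n →
      cbdA_loop bs eta count coeffs idx = coeffs ++ List.replicate n 0 := by
  intro n
  induction n with
  | zero =>
    intro coeffs idx _ hc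
    rw [cbdA_loop]
    simp at hc
    simp [hc]
  | succ n ih =>
    intro coeffs idx hidx hc
    rw [cbdA_loop]
    have hcond : (coeffs.length : Int) < count := by push_cast at hc; omega
    have hguard : ¬ (idx + 2 * eta > (bs.length : Int)) := by
      have : (0 : Int) ≤ (bs.length : Int) := by positivity
      omega
    have hrange : PySem.List.pyRange 0 eta 1 = [] := PySem.List.pyRange_one_eq_nil hη
    rw [if_pos hcond, if_neg hguard]
    simp only [hrange, List.foldl_nil]
    rw [ih (coeffs ++ [0 - 0]) (idx + 2 * eta) (by omega) (by simp; push_cast at hc ⊢; omega)]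
    simp [List.replicate_succ]

-- ===== VERDICT (by name: the statement is the Claim_ definition above) =====
theorem cbd_coefficients_spec : Claim_equal_cbd_coefficients := by
  intro bs eta count _ hpre
  unfold Spec_cbd_coefficients cbd_coefficients cbd_coefficients_alt
  by_cases hc : count ≤ 0
  · rw [cbdA_loop]
    have : ¬ (((([] : List Int)).length : Int) < count) := by simp; omega
    rw [if_neg this, if_pos hc]
  · rw [if_neg hc]
    by_cases he : eta ≤ 0
    · rw [if_pos he]
      rw [loopA_nonpos bs eta count he count.toNat [] 0 le_rfl (by simp; omega)]
      simp
    · rw [if_neg he]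
      push Not at he hc
      have hbound : 2 * eta * count ≤ (bs.length : Int) := by
        rcases hpre with h | h | h
        · omega
        · omega
        · exact h
      rw [loopA_pos bs eta count he count.toNat [] 0 le_rfl (by simp; omega)
          (by rw [zero_add, Int.toNat_of_nonneg (le_of_lt hc)]; exact hbound)]
      -- B side: the guard never fires, the foldl is a map, prefix lookups are take-sums
      have hnoguard : ∀ (out : List Int) (j : Int), j ∈ PySem.List.pyRange 0 count 1 →
          (fun out j =>
            let base := 2 * eta * j
            if base + 2 * eta > (bs.length : Int) then out
            else out ++ [2 * PySem.List.pyGetD (bs.foldl (fun p b => p ++ [PySem.List.pyGetD p (-1) 0 + b]) [0]) (base + eta) 0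
                          - PySem.List.pyGetD (bs.foldl (fun p b => p ++ [PySem.List.pyGetD p (-1) 0 + b]) [0]) base 0
                          - PySem.List.pyGetD (bs.foldl (fun p b => p ++ [PySem.List.pyGetD p (-1) 0 + b]) [0]) (base + 2 * eta) 0]) out j
          = out ++ [coeffAt bs eta (2 * eta * j)] := by
        intro out j hj
        rw [PySem.List.mem_pyRange_one] at hj
        have hb2 : 2 * eta * j + 2 * eta ≤ (bs.length : Int) := by nlinarith
        have hb0 : (0 : Int) ≤ 2 * eta * j := mul_nonneg (by omega) hj.1
        simp only
        rw [if_neg (by omega)]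
        rw [prefix_get bs (2 * eta * j + eta) (by omega) (by omega),
            prefix_get bs (2 * eta * j) hb0 (by omega),
            prefix_get bs (2 * eta * j + 2 * eta) (by omega) (by omega)]
        congr 1
        simp [coeffAt]
        ring_nf
      rw [PySem.List.foldl_congr_mem _ _ _ _ (fun out j hj => hnoguard out j hj)]
      rw [PySem.List.foldl_append_singleton_eq_map (fun j => coeffAt bs eta (2 * eta * j))]
      simp only [List.nil_append]
      rw [PySem.List.pyRange_one 0 count]
      rw [List.map_map]
      have hct : (count - 0).toNat = count.toNat := by omega
      rw [hct]
      apply List.map_congr_left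
      intro k _
      simp [Function.comp]
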